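-- pv_equiv track=rewrite | github.com/bpiyush/LiFT | shared/scripts/create_webdataset.py | distribute_samples
-- ===== SOURCE A (Python) =====
-- from typing import List, Dict
--
-- def distribute_samples(samples: List[Dict], num_shards: int) -> List[List[Dict]]:
--     """Distribute samples across shards."""
--     samples_per_shard = len(samples) // num_shards
--     remainder = len(samples) % num_shards
--
--     distributed_samples = []
--     start_idx = 0
--
--     for i in range(num_shards):
--         # Add one extra sample for the first 'remainder' shards
--         shard_size = samples_per_shard + (1 if i < remainder else 0)
--         end_idx = start_idx + shard_size
--
--         distributed_samples.append(samples[start_idx:end_idx])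
--         start_idx = end_idx
--
--     return distributed_samples
-- ===== SOURCE B (Python) =====
-- def distribute_samples(samples, num_shards):
--     """Distribute samples across shards: first build the explicit list of
--     shard sizes, then chop the sample list by splitting off one prefix per
--     size (no index bookkeeping at all)."""
--     q, r = divmod(len(samples), num_shards)
--     sizes = [q + 1] * r + [q] * (num_shards - r)
--     shards, rest = [], samples
--     for k in sizes:
--         shards.append(rest[:k])
--         rest = rest[k:]
--     return shards
-- ===== Notes on version B (the rewrite author's own statement) =====
-- stated objective: alternative
-- what changed: B works in two staged passes: it first materialises the explicit list of shard sizes ([q+1]*r + [q]*(num_shards-r)) and then chops the sample list by repeatedly splitting off a prefix of the next size, so A's single indexed loop threading a running start_idx and slicing by absolute positions disappears entirely.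
import Mathlib
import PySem

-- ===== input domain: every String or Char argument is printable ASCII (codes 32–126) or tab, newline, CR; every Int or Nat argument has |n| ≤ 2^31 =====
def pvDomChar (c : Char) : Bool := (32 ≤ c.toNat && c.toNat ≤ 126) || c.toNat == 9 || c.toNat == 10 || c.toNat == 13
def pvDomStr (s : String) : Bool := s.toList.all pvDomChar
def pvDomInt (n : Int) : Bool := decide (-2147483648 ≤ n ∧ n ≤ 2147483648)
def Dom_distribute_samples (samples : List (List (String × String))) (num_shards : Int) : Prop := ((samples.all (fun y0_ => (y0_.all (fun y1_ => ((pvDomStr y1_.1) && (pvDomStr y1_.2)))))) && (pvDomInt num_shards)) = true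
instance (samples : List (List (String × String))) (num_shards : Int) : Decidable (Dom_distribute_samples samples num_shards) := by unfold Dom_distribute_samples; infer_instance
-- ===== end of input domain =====

-- B replaces A's indexed loop threading a running start_idx with two staged passes:
-- build the explicit list of shard sizes, then chop the sample list by splitting off
-- one prefix per size; objective: alternative (same cost, different decomposition).
-- ===== PORT A =====
def distribute_samples (samples : List (List (String × String))) (num_shards : Int) : List (List (List (String × String))) :=
  let samples_per_shard := PySem.Int.floordiv (samples.length : Int) num_shards
  let remainder := PySem.Int.mod (samples.length : Int) num_shards
  let st := (PySem.List.pyRange 0 num_shards 1).foldl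
    (fun (st : List (List (List (String × String))) × Int) i =>
      let shard_size := samples_per_shard + (if i < remainder then 1 else 0)
      let end_idx := st.2 + shard_size
      (st.1 ++ [PySem.List.slice samples (some st.2) (some end_idx)], end_idx))
    ([], 0)
  st.1

-- ===== PORT B =====
def distribute_samples_alt (samples : List (List (String × String))) (num_shards : Int) : List (List (List (String × String))) :=
  let q := PySem.Int.floordiv (samples.length : Int) num_shards
  let r := PySem.Int.mod (samples.length : Int) num_shards
  let sizes := List.replicate r.toNat (q + 1) ++ List.replicate (num_shards - r).toNat q
  let st := sizes.foldl
    (fun (st : List (List (List (String × String))) × List (List (String × String))) k =>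
      (st.1 ++ [PySem.List.slice st.2 none (some k)], PySem.List.slice st.2 (some k) none))
    ([], samples)
  st.1

-- ===== PRECONDITION & SPEC =====
-- Pre_ excludes only num_shards = 0, where A raises ZeroDivisionError (B raises it too).
def Pre_distribute_samples (samples : List (List (String × String))) (num_shards : Int) : Prop := num_shards ≠ 0
instance (samples : List (List (String × String))) (num_shards : Int) : Decidable (Pre_distribute_samples samples num_shards) := by unfold Pre_distribute_samples; infer_instance
def pvWitness_distribute_samples : (List (List (String × String))) × Int := ([[("a", "1")], [("b", "2")], [("c", "3")]], 2)
def Spec_distribute_samples (samples : List (List (String × String))) (num_shards : Int) (out : List (List (List (String × String)))) : Prop := out = distribute_samples_alt samples num_shards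
instance (samples : List (List (String × String))) (num_shards : Int) (out : List (List (List (String × String)))) : Decidable (Spec_distribute_samples samples num_shards out) := by unfold Spec_distribute_samples; infer_instance

-- ===== CLAIM (what is proved, stated in full; the proofs are below) =====
def Claim_equal_distribute_samples : Prop := ∀ (samples : List (List (String × String))) (num_shards : Int), Dom_distribute_samples samples num_shards → Pre_distribute_samples samples num_shards → Spec_distribute_samples samples num_shards (distribute_samples samples num_shards)

-- ===== LEMMAS AND PROOFS =====

-- A fold that slices `samples` at absolute positions and tracks the next start index
-- equals the fold that chops the remaining suffix, for any list of nonnegative sizes.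
theorem fold_idx_eq_fold_chop (samples : List (List (String × String))) :
    ∀ (ks : List Int), (∀ k ∈ ks, 0 ≤ k) →
      ∀ (s : Nat) (acc : List (List (List (String × String)))),
      (ks.foldl
        (fun (st : List (List (List (String × String))) × Int) k =>
          (st.1 ++ [PySem.List.slice samples (some st.2) (some (st.2 + k))], st.2 + k))
        (acc, (s : Int))).1
      = (ks.foldl
        (fun (st : List (List (List (String × String))) × List (List (String × String))) k =>
          (st.1 ++ [PySem.List.slice st.2 none (some k)], PySem.List.slice st.2 (some k) none))
        (acc, samples.drop s)).1 := by
  intro ks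
  induction ks with
  | nil => intro _ s acc; simp
  | cons k ks ih =>
    intro hks s acc
    have hk : 0 ≤ k := hks k (by simp)
    have hkeq : k = ((k.toNat : Nat) : Int) := by omega
    simp only [List.foldl_cons]
    rw [hkeq, PySem.List.slice_natCast_add,
        PySem.List.slice_to_natCast, PySem.List.slice_from_natCast]
    have h1 : ((s : Int) + (k.toNat : Int)) = (((s + k.toNat : Nat) : Nat) : Int) := by push_cast; ring
    have h2 : (samples.drop s).drop k.toNat = samples.drop (s + k.toNat) := by
      rw [List.drop_drop]
    rw [h1, h2, ih (fun x hx => hks x (by simp [hx])) (s + k.toNat)]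

-- The list of shard sizes A computes along range(n) is r copies of q+1 then n-r copies of q.
theorem map_size_eq (q r : Int) (hr : 0 ≤ r) :
    ∀ (m : Nat),
      (PySem.List.pyRange 0 (m : Int) 1).map (fun i => q + (if i < r then 1 else 0))
      = List.replicate (min m r.toNat) (q + 1) ++ List.replicate (m - r.toNat) q := by
  intro m
  induction m with
  | zero => simp
  | succ n ih =>
    have h1 : ((n + 1 : Nat) : Int) = (n : Int) + 1 := by push_cast; ring
    rw [h1, PySem.List.pyRange_one_succ_right (by positivity), List.map_append, ih]
    by_cases hlt : (n : Int) < r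
    · have hn : n < r.toNat := by omega
      have e1 : min n r.toNat = n := by omega
      have e2 : min (n + 1) r.toNat = n + 1 := by omega
      have e3 : n - r.toNat = 0 := by omega
      have e4 : n + 1 - r.toNat = 0 := by omega
      simp [hlt, e1, e3, e4, List.replicate_succ']
    · have e1 : min n r.toNat = r.toNat := by omega
      have e2 : min (n + 1) r.toNat = r.toNat := by omega
      have e3 : n + 1 - r.toNat = (n - r.toNat) + 1 := by omega
      simp [hlt, e1, e2, e3, List.replicate_succ', List.append_assoc]

theorem distribute_samples_eq_alt (samples : List (List (String × String))) (num_shards : Int)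
    (h : num_shards ≠ 0) :
    distribute_samples samples num_shards = distribute_samples_alt samples num_shards := by
  unfold distribute_samples distribute_samples_alt
  rcases lt_or_gt_of_ne h with hneg | hpos
  · have hb := PySem.Int.mod_neg_bounds (a := (samples.length : Int)) hneg
    have h1 : (PySem.Int.mod (samples.length : Int) num_shards).toNat = 0 := by omega
    have h2 : (num_shards - PySem.Int.mod (samples.length : Int) num_shards).toNat = 0 := by omega
    dsimp only
    rw [PySem.List.pyRange_one_eq_nil (by omega), h1, h2]
    simp
  · set q := PySem.Int.floordiv (samples.length : Int) num_shards with hq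
    set r := PySem.Int.mod (samples.length : Int) num_shards with hrdef
    have hr0 : 0 ≤ r := PySem.Int.mod_nonneg _ hpos
    have hrlt : r < num_shards := PySem.Int.mod_lt _ hpos
    have hq0 : 0 ≤ q := by
      rw [hq, PySem.Int.floordiv_eq_ediv_of_pos hpos]
      exact Int.ediv_nonneg (by positivity) (by omega)
    have hn : num_shards = ((num_shards.toNat : Nat) : Int) := by omega
    dsimp only
    rw [hn]
    -- rewrite A's fold over range(n) as a fold over the mapped size list
    have hA : (PySem.List.pyRange 0 ((num_shards.toNat : Nat) : Int) 1).foldl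
        (fun (st : List (List (List (String × String))) × Int) i =>
          (st.1 ++ [PySem.List.slice samples (some st.2) (some (st.2 + (q + (if i < r then 1 else 0))))],
           st.2 + (q + (if i < r then 1 else 0)))) ([], 0)
      = ((PySem.List.pyRange 0 ((num_shards.toNat : Nat) : Int) 1).map
          (fun i => q + (if i < r then 1 else 0))).foldl
        (fun (st : List (List (List (String × String))) × Int) k =>
          (st.1 ++ [PySem.List.slice samples (some st.2) (some (st.2 + k))], st.2 + k)) ([], 0) := by
      rw [List.foldl_map]
    rw [hA]
    rw [map_size_eq q r hr0 num_shards.toNat]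
    have hmin : min num_shards.toNat r.toNat = r.toNat := by omega
    rw [hmin]
    have hsz : ∀ k ∈ List.replicate r.toNat (q + 1) ++ List.replicate (num_shards.toNat - r.toNat) q, 0 ≤ k := by
      intro k hk
      rcases List.mem_append.mp hk with hk | hk <;>
        · have := List.eq_of_mem_replicate hk; omega
    have := fold_idx_eq_fold_chop samples
      (List.replicate r.toNat (q + 1) ++ List.replicate (num_shards.toNat - r.toNat) q) hsz 0 []
    simp only [Nat.cast_zero, List.drop_zero] at this
    rw [this, show num_shards.toNat - r.toNat = ((num_shards.toNat : Int) - r).toNat from by omega]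

-- ===== VERDICT (by name: the statement is the Claim_ definition above) =====
theorem distribute_samples_spec : Claim_equal_distribute_samples := by
  intro samples num_shards _ hpre
  unfold Spec_distribute_samples
  exact distribute_samples_eq_alt samples num_shards hpre
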